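-- pv_equiv track=rewrite | github.com/MixedSignalDevelopment/C-Font-Generator | fontgen.py | pixels_to_c_array
-- ===== SOURCE A (Python) =====
-- def pixels_to_c_array(pixels, width, height, bit_depth):
--     elements_list = []
--
--     for row in range(height):
--         row_element = 0
--         for col in range(width):
--             pixel_index = row * width + col
--             if pixels[pixel_index] == 1:
--                 row_element |= (1 << ((bit_depth - 1) - (col % bit_depth)))
--
--             if (col + 1) % bit_depth == 0 or col == width - 1:
--                 elements_list.append(row_element)
--                 row_element = 0
--
--     hex_format = f"0x{{:0{bit_depth//4}X}}"
--     hex_array = [hex_format.format(elem) for elem in elements_list]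
--     hex_array_str = ", ".join(hex_array)
--
--     return hex_array_str, len(hex_array)
-- ===== SOURCE B (Python) =====
-- def pixels_to_c_array(pixels, width, height, bit_depth):
--     elements = []
--     if bit_depth > 0:
--         for row in range(height):
--             base = row * width
--             for start in range(0, width, bit_depth):
--                 elem = 0
--                 for j in range(start, min(start + bit_depth, width)):
--                     if pixels[base + j] == 1:
--                         elem |= 1 << (bit_depth - 1 - (j - start))
--                 elements.append(elem)
--     fmt = "0x{{:0{}X}}".format(bit_depth // 4)
--     return ", ".join(fmt.format(e) for e in elements), len(elements)
-- ===== Notes on version B (the rewrite author's own statement) =====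
-- stated objective: alternative
-- what changed: Replaces A's flat per-column loop with modular flush counter by an explicit per-chunk decomposition: per row, iterate over chunk starts with range(0, width, bit_depth) and build each element with a short inner loop over the chunk's columns, so col % bit_depth and the flush condition disappear.
import Mathlib
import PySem

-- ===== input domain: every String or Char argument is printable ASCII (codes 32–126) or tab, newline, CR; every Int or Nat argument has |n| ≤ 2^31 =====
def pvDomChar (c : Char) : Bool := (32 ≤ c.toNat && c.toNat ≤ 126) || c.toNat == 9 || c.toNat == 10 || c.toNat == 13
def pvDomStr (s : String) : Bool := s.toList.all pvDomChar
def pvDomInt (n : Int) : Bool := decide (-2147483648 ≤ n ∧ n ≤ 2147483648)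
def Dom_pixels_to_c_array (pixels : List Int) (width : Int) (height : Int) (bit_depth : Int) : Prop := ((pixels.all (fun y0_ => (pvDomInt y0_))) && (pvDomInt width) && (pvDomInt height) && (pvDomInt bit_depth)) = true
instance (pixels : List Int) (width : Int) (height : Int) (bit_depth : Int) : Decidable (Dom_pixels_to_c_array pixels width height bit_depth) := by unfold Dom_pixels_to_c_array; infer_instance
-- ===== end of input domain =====

-- B replaces A's flat column loop + modular flush by an explicit per-chunk loop (alternative
-- decomposition, same cost). Equality is proved on Pre_, the inputs where A returns normally.

-- ===== PORT A =====
-- shared port of Python's  "0x" + format(e, '0kX')  (uppercase hex, zero-padded to k digits);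
-- exact for 0 ≤ e and 0 ≤ k, which Pre_ guarantees wherever it is applied
def pvHexFmt (k : Nat) (e : Int) : String :=
  let ds := (Nat.toDigits 16 e.toNat).map PySem.Chars.upperChar
  String.ofList ('0' :: 'x' :: (List.replicate (k - ds.length) '0' ++ ds))

-- the double loop of A, verbatim (rows, then a flat column loop with modular flush)
def pvElemsA (pixels : List Int) (width : Int) (height : Int) (bit_depth : Int) : List Int :=
  (PySem.List.pyRange 0 height 1).foldl (fun acc row =>
      ((PySem.List.pyRange 0 width 1).foldl (fun (st : List Int × Int) col =>
          -- pixels[pixel_index]: pyGetD; Pre_ keeps the index in range.  1 << s : `.toNat` exact for s ≥ 0 (Pre_)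
          let re := if PySem.List.pyGetD pixels (row * width + col) 0 == 1
                    then PySem.Int.bor st.2 ((1 : Int) <<< ((bit_depth - 1) - PySem.Int.mod col bit_depth).toNat)
                    else st.2
          if PySem.Int.mod (col + 1) bit_depth == 0 || col == width - 1
          then (st.1 ++ [re], 0) else (st.1, re))
        (acc, (0 : Int))).1) []

def pixels_to_c_array (pixels : List Int) (width : Int) (height : Int) (bit_depth : Int) : String × Int :=
  let elements_list := pvElemsA pixels width height bit_depth
  let k := (PySem.Int.floordiv bit_depth 4).toNat
  (PySem.Str.join ", " (elements_list.map (pvHexFmt k)), (elements_list.length : Int))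

-- ===== PORT B =====
-- B's loops, verbatim (guard, rows, chunk starts, short per-chunk loop)
def pvElemsB (pixels : List Int) (width : Int) (height : Int) (bit_depth : Int) : List Int :=
  if bit_depth > 0 then
    (PySem.List.pyRange 0 height 1).foldl (fun acc row =>
      let base := row * width
      (PySem.List.pyRange 0 width bit_depth).foldl (fun acc2 start =>
        acc2 ++ [(PySem.List.pyRange start (min (start + bit_depth) width) 1).foldl
          (fun e j => if PySem.List.pyGetD pixels (base + j) 0 == 1
                      then PySem.Int.bor e ((1 : Int) <<< (bit_depth - 1 - (j - start)).toNat)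
                      else e) 0]) acc) []
  else []

def pixels_to_c_array_alt (pixels : List Int) (width : Int) (height : Int) (bit_depth : Int) : String × Int :=
  let elements := pvElemsB pixels width height bit_depth
  let k := (PySem.Int.floordiv bit_depth 4).toNat
  (PySem.Str.join ", " (elements.map (pvHexFmt k)), (elements.length : Int))

-- ===== PRECONDITION & SPEC =====
-- Pre_ = exactly the inputs where A returns: with a positive grid A needs bit_depth ≥ 1 (else
-- ZeroDivisionError / negative-shift or format ValueError) and all width*height pixels present
-- (else IndexError); with width ≤ 0 or height ≤ 0 no pixel is touched and A returns ("", 0).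
def Pre_pixels_to_c_array (pixels : List Int) (width : Int) (height : Int) (bit_depth : Int) : Prop :=
  height ≤ 0 ∨ width ≤ 0 ∨ (1 ≤ bit_depth ∧ width * height ≤ (pixels.length : Int))
instance (pixels : List Int) (width : Int) (height : Int) (bit_depth : Int) : Decidable (Pre_pixels_to_c_array pixels width height bit_depth) := by unfold Pre_pixels_to_c_array; infer_instance

def pvWitness_pixels_to_c_array : List Int × Int × Int × Int := ([1, 0, 0, 1, 1, 1], 3, 2, 2)

def Spec_pixels_to_c_array (pixels : List Int) (width : Int) (height : Int) (bit_depth : Int) (out : String × Int) : Prop := out = pixels_to_c_array_alt pixels width height bit_depth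
instance (pixels : List Int) (width : Int) (height : Int) (bit_depth : Int) (out : String × Int) : Decidable (Spec_pixels_to_c_array pixels width height bit_depth out) := by unfold Spec_pixels_to_c_array; infer_instance

-- ===== CLAIM (what is proved, stated in full; the proofs are below) =====
def Claim_equal_pixels_to_c_array : Prop := ∀ (pixels : List Int) (width : Int) (height : Int) (bit_depth : Int), Dom_pixels_to_c_array pixels width height bit_depth → Pre_pixels_to_c_array pixels width height bit_depth → Spec_pixels_to_c_array pixels width height bit_depth (pixels_to_c_array pixels width height bit_depth)
-- ===== LEMMAS AND PROOFS =====

-- proof-side names for the loop bodies of the two ports (definitionally equal to their lambdas),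
-- for a generic pixel test p
def pvStepA (p : Int → Bool) (b w : Int) (st : List Int × Int) (col : Int) : List Int × Int :=
  let re := if p col then PySem.Int.bor st.2 ((1 : Int) <<< ((b - 1) - PySem.Int.mod col b).toNat) else st.2
  if PySem.Int.mod (col + 1) b == 0 || col == w - 1 then (st.1 ++ [re], 0) else (st.1, re)

def pvInnerB (p : Int → Bool) (b s : Int) (e j : Int) : Int :=
  if p j then PySem.Int.bor e ((1 : Int) <<< (b - 1 - (j - s)).toNat) else e

def pvChunk (p : Int → Bool) (b w s : Int) : Int :=
  (PySem.List.pyRange s (min (s + b) w) 1).foldl (pvInnerB p b s) 0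

-- range(a, b, step) with positive step, cons and nil decompositions
lemma pvRange_step_cons (s w b : Int) (hb : 0 < b) (h : s < w) :
    PySem.List.pyRange s w b = s :: PySem.List.pyRange (s + b) w b := by
  rw [PySem.List.pyRange_of_pos _ _ hb, PySem.List.pyRange_of_pos _ _ hb, if_pos h]
  by_cases h2 : s + b < w
  · rw [if_pos h2]
    have e2 : (w - s + b - 1) / b = (w - (s + b) + b - 1) / b + 1 := by
      have e1 : w - s + b - 1 = (w - (s + b) + b - 1) + 1 * b := by ring
      rw [e1, Int.add_mul_ediv_right _ _ (by omega : b ≠ 0)]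
    have hnn : 0 ≤ (w - (s + b) + b - 1) / b := Int.ediv_nonneg (by omega) (by omega)
    rw [e2, show ((w - (s + b) + b - 1) / b + 1).toNat = ((w - (s + b) + b - 1) / b).toNat + 1 by omega]
    rw [List.range_succ_eq_map, List.map_cons, List.map_map]
    congr 1
    · simp
    · apply List.map_congr_left
      intro k _
      simp only [Function.comp_apply]
      push_cast
      ring
  · rw [if_neg h2]
    have e2 : (w - s + b - 1) / b = 1 := by
      have e1 : w - s + b - 1 = (w - s - 1) + 1 * b := by ring
      rw [e1, Int.add_mul_ediv_right _ _ (by omega : b ≠ 0),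
        Int.ediv_eq_zero_of_lt (by omega) (by omega)]
      norm_num
    rw [e2]
    simp

lemma pvRange_step_nil (s w b : Int) (hb : 0 < b) (h : w ≤ s) :
    PySem.List.pyRange s w b = [] := by
  rw [PySem.List.pyRange_of_pos _ _ hb]
  simp [show ¬ s < w by omega]

-- within a chunk [s, m) (m = s+b, or m = w on a partial last chunk), A's flat loop
-- accumulates like B's inner loop and flushes exactly at the chunk's last column
lemma pvA_chunk (p : Int → Bool) (b w s m : Int) (hb : 1 ≤ b) (hd : b ∣ s)
    (hm2 : m ≤ s + b) (hm3 : m = s + b ∨ m = w) (hm4 : m ≤ w) :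
    ∀ (n : Nat) (t e : Int) (acc : List Int), (m - t).toNat = n → s ≤ t → t < m →
      List.foldl (pvStepA p b w) (acc, e) (PySem.List.pyRange t m 1)
        = (acc ++ [List.foldl (pvInnerB p b s) e (PySem.List.pyRange t m 1)], 0) := by
  intro n
  induction n with
  | zero => intro t e acc hn h1 h2; omega
  | succ n ih =>
    intro t e acc hn h1 h2
    obtain ⟨q, hq⟩ := hd
    have hmod : ∀ x : Int, s ≤ x → x < s + b → PySem.Int.mod x b = x - s := by
      intro x hx1 hx2
      rw [PySem.Int.mod_eq_emod_of_pos (by omega)]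
      have h0 : x % b = (x - s) % b := by
        conv_lhs => rw [show x = (x - s) + b * q by omega]
        rw [Int.add_mul_emod_self_left]
      rw [h0]
      exact Int.emod_eq_of_lt (by omega) (by omega)
    rw [PySem.List.pyRange_one_cons h2, List.foldl_cons, List.foldl_cons]
    by_cases hlast : t + 1 = m
    · have hflush : (PySem.Int.mod (t + 1) b == 0 || t == w - 1) = true := by
        rcases hm3 with h' | h'
        · have hz : PySem.Int.mod (t + 1) b = 0 := by
            rw [PySem.Int.mod_eq_zero_iff_dvd]
            refine ⟨q + 1, ?_⟩
            rw [mul_add, mul_one]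
            omega
          simp [hz]
        · simp [show t = w - 1 by omega]
      rw [PySem.List.pyRange_one_eq_nil (by omega : m ≤ t + 1)]
      simp only [List.foldl_nil, pvStepA, pvInnerB, hflush, if_true]
      rw [hmod t h1 (by omega)]
    · have hnf : (PySem.Int.mod (t + 1) b == 0 || t == w - 1) = false := by
        have h1' : PySem.Int.mod (t + 1) b = t + 1 - s := hmod (t + 1) (by omega) (by omega)
        have hw : t ≠ w - 1 := by omega
        simp only [Bool.or_eq_false_iff, beq_eq_false_iff_ne, ne_eq]
        refine ⟨?_, hw⟩
        rw [h1']
        omega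
      simp only [pvStepA, hnf, Bool.false_eq_true, if_false]
      rw [hmod t h1 (by omega)]
      exact ih (t + 1) (pvInnerB p b s e t) acc (by omega) (by omega) (by omega)

-- a whole row: A's flat loop from a chunk boundary s produces exactly the chunk elements from s on
lemma pvA_row (p : Int → Bool) (b w : Int) (hb : 1 ≤ b) :
    ∀ (n : Nat) (s : Int) (acc : List Int), (w - s).toNat = n → 0 ≤ s → b ∣ s →
      List.foldl (pvStepA p b w) (acc, 0) (PySem.List.pyRange s w 1)
        = (acc ++ (PySem.List.pyRange s w b).map (pvChunk p b w), 0) := by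
  intro n
  induction n using Nat.strong_induction_on with
  | _ n ih =>
    intro s acc hn hs hd
    by_cases hsw : s < w
    · by_cases hsb : s + b ≤ w
      · have hmm : min (s + b) w = s + b := min_eq_left hsb
        rw [PySem.List.pyRange_one_append s (s + b) w (by omega) hsb, List.foldl_append]
        rw [pvA_chunk p b w s (s + b) hb hd le_rfl (Or.inl rfl) hsb ((s + b) - s).toNat s 0 acc
          (by omega) le_rfl (by omega)]
        have hc : pvChunk p b w s = List.foldl (pvInnerB p b s) 0 (PySem.List.pyRange s (s + b) 1) := by
          unfold pvChunk; rw [hmm]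
        rw [← hc]
        rw [ih (w - (s + b)).toNat (by omega) (s + b) (acc ++ [pvChunk p b w s]) rfl (by omega)
          (dvd_add hd (dvd_refl b))]
        rw [pvRange_step_cons s w b (by omega) hsw, List.map_cons]
        simp
      · have hmm : min (s + b) w = w := min_eq_right (by omega)
        rw [pvA_chunk p b w s w hb hd (by omega) (Or.inr rfl) le_rfl (w - s).toNat s 0 acc rfl le_rfl hsw]
        have hc : pvChunk p b w s = List.foldl (pvInnerB p b s) 0 (PySem.List.pyRange s w 1) := by
          unfold pvChunk; rw [hmm]
        rw [← hc, pvRange_step_cons s w b (by omega) hsw,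
          pvRange_step_nil (s + b) w b (by omega) (by omega), List.map_cons, List.map_nil]
    · rw [PySem.List.pyRange_one_eq_nil (by omega), pvRange_step_nil s w b (by omega) (by omega)]
      simp

-- B's append-one-element loop is a map
lemma pvFoldl_append_map {α β : Type} (l : List α) (f : α → β) :
    ∀ (acc : List β), List.foldl (fun a x => a ++ [f x]) acc l = acc ++ l.map f := by
  induction l with
  | nil => simp
  | cons x xs ih => intro acc; simp [ih]

lemma pvFoldl_id {α β : Type} (l : List β) (x : α) :
    List.foldl (fun a _ => a) x l = x := by
  induction l <;> simp [*]

-- one row of A equals one row of B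
lemma pvRow_eq (p : Int → Bool) (w b : Int) (hb : 1 ≤ b) (acc : List Int) :
    (List.foldl (pvStepA p b w) (acc, 0) (PySem.List.pyRange 0 w 1)).1
      = List.foldl (fun a s => a ++ [pvChunk p b w s]) acc (PySem.List.pyRange 0 w b) := by
  rw [pvA_row p b w hb (w - 0).toNat 0 acc rfl le_rfl (dvd_zero b), pvFoldl_append_map]

-- all rows of A equal all rows of B
lemma pvRows_eq (pixels : List Int) (w b : Int) (hb : 1 ≤ b) (rs : List Int) :
    ∀ (acc : List Int),
      List.foldl (fun acc row =>
          (List.foldl (pvStepA (fun col => PySem.List.pyGetD pixels (row * w + col) 0 == 1) b w)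
            (acc, 0) (PySem.List.pyRange 0 w 1)).1) acc rs
        = List.foldl (fun acc row =>
            List.foldl (fun a s =>
                a ++ [pvChunk (fun col => PySem.List.pyGetD pixels (row * w + col) 0 == 1) b w s])
              acc (PySem.List.pyRange 0 w b)) acc rs := by
  induction rs with
  | nil => intro acc; rfl
  | cons r rs ih =>
    intro acc
    simp only [List.foldl_cons]
    rw [pvRow_eq (fun col => PySem.List.pyGetD pixels (r * w + col) 0 == 1) w b hb acc]
    exact ih _

-- the two ports build the same element list whenever bit_depth ≥ 1
lemma pvElemsAB_eq (pixels : List Int) (width height bit_depth : Int) (hb : 1 ≤ bit_depth) :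
    pvElemsA pixels width height bit_depth = pvElemsB pixels width height bit_depth := by
  unfold pvElemsA pvElemsB
  rw [if_pos (by omega : bit_depth > 0)]
  exact pvRows_eq pixels width bit_depth hb (PySem.List.pyRange 0 height 1) []

-- and the outputs agree on Pre_
lemma pvElements_eq (pixels : List Int) (width height bit_depth : Int)
    (h : Pre_pixels_to_c_array pixels width height bit_depth) :
    pixels_to_c_array pixels width height bit_depth
      = pixels_to_c_array_alt pixels width height bit_depth := by
  by_cases hbd : 1 ≤ bit_depth
  · simp only [pixels_to_c_array, pixels_to_c_array_alt]
    rw [pvElemsAB_eq pixels width height bit_depth hbd]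
  · unfold Pre_pixels_to_c_array at h
    have hB : pvElemsB pixels width height bit_depth = [] := by
      unfold pvElemsB
      rw [if_neg (by omega)]
    have hA : pvElemsA pixels width height bit_depth = [] := by
      rcases h with h | h | h
      · unfold pvElemsA
        rw [PySem.List.pyRange_one_eq_nil (by omega : height ≤ 0), List.foldl_nil]
      · unfold pvElemsA
        rw [show PySem.List.pyRange 0 width 1 = [] from PySem.List.pyRange_one_eq_nil (by omega)]
        simp only [List.foldl_nil]
        exact pvFoldl_id _ _
      · omega
    simp only [pixels_to_c_array, pixels_to_c_array_alt]
    rw [hA, hB]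

-- ===== VERDICT (by name: the statement is the Claim_ definition above) =====
theorem pixels_to_c_array_spec : Claim_equal_pixels_to_c_array := by
  intro pixels width height bit_depth _ hpre
  unfold Spec_pixels_to_c_array
  exact pvElements_eq pixels width height bit_depth hpre
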